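-- pv_equiv track=rewrite | github.com/Spyking05/music-generator | music generator.py | generate_drum_pattern
-- ===== SOURCE A (Python) =====
-- def generate_drum_pattern(length=500):
--     """Simple drum pattern: alternating kick and snare."""
--     pattern = []
--     for i in range(length):
--         if i % 4 == 0:  # Kick on every 1st beat
--             pattern.append("Kick")
--         elif i % 4 == 2:  # Snare on every 3rd beat
--             pattern.append("Snare")
--         else:
--             pattern.append("HiHat")  # Hi-hat on 2nd and 4th
--     return pattern
-- ===== SOURCE B (Python) =====
-- def generate_drum_pattern(length=500):
--     """Simple drum pattern: alternating kick and snare."""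
--     block = ["Kick", "HiHat", "Snare", "HiHat"]
--     return (block * (length // 4 + 1))[:length]
-- ===== Notes on version B (the rewrite author's own statement) =====
-- stated objective: idiomatic
-- what changed: B builds the fixed period block once and tiles it by list multiplication, trimming with a slice, instead of looping over range(length) with a modulus branch.
import Mathlib
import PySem

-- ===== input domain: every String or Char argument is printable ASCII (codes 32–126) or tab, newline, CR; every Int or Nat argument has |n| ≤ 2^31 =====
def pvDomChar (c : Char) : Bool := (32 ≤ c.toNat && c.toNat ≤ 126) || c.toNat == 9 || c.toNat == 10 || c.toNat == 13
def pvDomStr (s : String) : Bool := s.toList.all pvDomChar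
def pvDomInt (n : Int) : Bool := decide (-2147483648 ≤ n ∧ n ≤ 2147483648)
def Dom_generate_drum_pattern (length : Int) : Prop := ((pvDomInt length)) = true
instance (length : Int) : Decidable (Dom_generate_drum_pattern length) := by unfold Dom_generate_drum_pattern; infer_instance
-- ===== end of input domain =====

-- B tiles the fixed period block and trims it with a slice, instead of looping over
-- range(length) with a modulus branch (idiomatic; same asymptotic cost).


-- ===== PORT A =====
def generate_drum_pattern (length : Int) : List String :=
  (PySem.List.pyRange 0 length 1).foldl
    (fun pattern i =>
      if PySem.Int.mod i 4 = 0 then pattern ++ ["Kick"]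
      else if PySem.Int.mod i 4 = 2 then pattern ++ ["Snare"]
      else pattern ++ ["HiHat"])
    []

-- ===== PORT B =====
def generate_drum_pattern_alt (length : Int) : List String :=
  let block : List String := ["Kick", "HiHat", "Snare", "HiHat"]
  PySem.List.slice (List.flatten (List.replicate (PySem.Int.floordiv length 4 + 1).toNat block))
    none (some length)

-- ===== PRECONDITION & SPEC =====
def Spec_generate_drum_pattern (length : Int) (out : List String) : Prop := out = generate_drum_pattern_alt length
instance (length : Int) (out : List String) : Decidable (Spec_generate_drum_pattern length out) := by unfold Spec_generate_drum_pattern; infer_instance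

-- ===== CLAIM (what is proved, stated in full; the proofs are below) =====
def Claim_equal_generate_drum_pattern : Prop := ∀ (length : Int), Dom_generate_drum_pattern length → Spec_generate_drum_pattern length (generate_drum_pattern length)

-- ===== LEMMAS AND PROOFS =====

def pvBeat (k : Nat) : String :=
  if PySem.Int.mod (k : Int) 4 = 0 then "Kick"
  else if PySem.Int.mod (k : Int) 4 = 2 then "Snare"
  else "HiHat"

def pvBlock : List String := ["Kick", "HiHat", "Snare", "HiHat"]

theorem pvBeat_add_four (k : Nat) : pvBeat (4 + k) = pvBeat k := by
  unfold pvBeat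
  have h : PySem.Int.mod ((4 + k : Nat) : Int) 4 = PySem.Int.mod (k : Int) 4 := by
    rw [PySem.Int.mod_eq_emod_of_pos (by norm_num : (0:Int) < 4), PySem.Int.mod_eq_emod_of_pos (by norm_num : (0:Int) < 4)]
    omega
  rw [h]

theorem pvA_eq_map (length : Int) :
    generate_drum_pattern length = (List.range length.toNat).map pvBeat := by
  unfold generate_drum_pattern
  rw [PySem.List.pyRange_one]
  simp only [Int.sub_zero]
  rw [List.foldl_map]
  induction length.toNat with
  | zero => simp
  | succ n ih =>
    rw [List.range_succ, List.foldl_append, List.map_append, ih]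
    simp only [zero_add, List.foldl_cons, List.foldl_nil, List.map_cons, List.map_nil, pvBeat]
    split_ifs <;> simp_all

theorem pvMap_eq_take (m n : Nat) (h : n ≤ 4 * m) :
    (List.range n).map pvBeat = (List.flatten (List.replicate m pvBlock)).take n := by
  induction m generalizing n with
  | zero =>
    interval_cases n
    simp
  | succ m ih =>
    rw [List.replicate_succ, List.flatten_cons]
    by_cases hn : n ≤ 4
    · rw [List.take_append]
      have h4 : n - pvBlock.length = 0 := by simp [pvBlock]; omega
      rw [h4, List.take_zero, List.append_nil]
      interval_cases n <;> (try decide)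
    · obtain ⟨k, rfl⟩ : ∃ k, n = 4 + k := ⟨n - 4, by omega⟩
      rw [List.range_add, List.map_append, List.map_map, List.take_append]
      have h4 : 4 + k - pvBlock.length = k := by simp [pvBlock]
      rw [h4]
      have hb : (List.range 4).map pvBeat = pvBlock.take (4 + k) := by
        have : pvBlock.take (4 + k) = pvBlock := by
          apply List.take_of_length_le; simp [pvBlock]
        rw [this]; decide
      rw [hb, List.append_cancel_left_eq]
      have hf : pvBeat ∘ (fun x => 4 + x) = pvBeat := by
        funext x; exact pvBeat_add_four x
      rw [hf]
      exact ih k (by omega)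

-- ===== VERDICT (by name: the statement is the Claim_ definition above) =====
theorem generate_drum_pattern_spec : Claim_equal_generate_drum_pattern := by
  intro length _
  unfold Spec_generate_drum_pattern generate_drum_pattern_alt
  rw [pvA_eq_map]
  by_cases hpos : 0 ≤ length
  · rw [PySem.List.slice_to _ hpos]
    apply pvMap_eq_take
    have heq := PySem.Int.floordiv_mul_add_mod length 4
    rw [PySem.Int.mod_eq_emod_of_pos (by norm_num : (0:Int) < 4)] at heq
    omega
  · have h0 : length.toNat = 0 := by omega
    have hq : (PySem.Int.floordiv length 4 + 1).toNat = 0 := by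
      have heq := PySem.Int.floordiv_mul_add_mod length 4
      rw [PySem.Int.mod_eq_emod_of_pos (by norm_num : (0:Int) < 4)] at heq
      omega
    rw [h0, hq]
    simp [PySem.List.slice]
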